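-- pv_equiv track=rewrite | github.com/malinapetean/University-Projects | FP/a1-916-Petean-Anamaria/p3.py | number_divisor
-- ===== SOURCE A (Python) =====
-- def prime_nr(nr):
--     if(nr==0 or nr==1):
--         return 0
--     else:
--         for i in range(2,nr):
--             if(nr%i==0):
--                 return 0
--     return 1
--
-- def nrpdiv(nr):
--     ct=0
--     for i in range(2,nr+1):
--         if(nr%i==0 and prime_nr(i)==1):
--             ct+=1
--     return ct
--
-- def number_divisor(n):
--     if(n == 1):
--         return[1, 1]
--     ct = 1
--     i = 1
--     number = 0
--     k = 0
--     while(ct<n):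
--         div = nrpdiv(i)
--         if(ct + div < n):
--             ct += div
--             number = i + 1
--             k = 0
--         else:
--             val = ct + div
--             dif = val - n
--             k = div - dif
--             number = i
--             ct = n + 1
--         i += 1
--     return [number, k]
-- ===== SOURCE B (Python) =====
-- def _omega(m):
--     # number of distinct prime factors of m, by trial division with stripping
--     w, d = 0, 2
--     while d * d <= m:
--         if m % d == 0:
--             w += 1
--             while m % d == 0:
--                 m //= d
--         d += 1
--     if m > 1:
--         w += 1
--     return w
--
-- def number_divisor(n):
--     if n == 1:
--         return [1, 1]
--     ct, i = 1, 2
--     while ct < n: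
--         w = _omega(i)
--         if ct + w >= n:
--             return [i, n - ct]
--         ct += w
--         i += 1
--     return [0, 0]
-- ===== Notes on version B (the rewrite author's own statement) =====
-- stated objective: faster
-- what changed: Per i, A counts prime divisors by scanning every j in 2..i and testing j's primality with full trial division (O(i^2) per i); B factorizes i directly by trial division up to sqrt(i), stripping each found factor, so each i costs O(sqrt(i)).
import Mathlib
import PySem

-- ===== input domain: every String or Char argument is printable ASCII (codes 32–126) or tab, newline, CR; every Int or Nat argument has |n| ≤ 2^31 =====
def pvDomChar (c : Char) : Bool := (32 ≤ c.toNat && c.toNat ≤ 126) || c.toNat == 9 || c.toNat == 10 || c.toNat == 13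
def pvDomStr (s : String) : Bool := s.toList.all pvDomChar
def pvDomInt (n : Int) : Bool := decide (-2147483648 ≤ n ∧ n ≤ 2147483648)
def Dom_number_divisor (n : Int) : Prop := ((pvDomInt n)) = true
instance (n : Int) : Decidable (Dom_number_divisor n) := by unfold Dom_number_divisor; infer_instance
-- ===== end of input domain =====

-- B replaces A's per-number scan over all candidates 2..i (each checked for primality by full
-- trial division) with direct factorization of i: trial divide up to √i, stripping each found
-- prime factor; objective: faster (measured).

-- ===== PORT A =====
def prime_nr (nr : Int) : Int :=
  if nr = 0 ∨ nr = 1 then 0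
  else if (PySem.List.pyRange 2 nr 1).any (fun i => PySem.Int.mod nr i == 0) then 0 else 1

def nrpdiv (nr : Int) : Int :=
  (PySem.List.pyRange 2 (nr + 1) 1).foldl
    (fun ct i => if PySem.Int.mod nr i = 0 ∧ prime_nr i = 1 then ct + 1 else ct) 0

-- characterisation of A's primality test (needed already for the termination of A's while loop)
theorem prime_nr_one_iff (m : Int) (hm : 2 ≤ m) : prime_nr m = 1 ↔ Nat.Prime m.toNat := by
  have hm0 : m = (m.toNat : Int) := (Int.toNat_of_nonneg (by omega)).symm
  unfold prime_nr
  rw [if_neg (by omega)]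
  constructor
  · intro h
    by_cases hany : (PySem.List.pyRange 2 m 1).any (fun i => PySem.Int.mod m i == 0) = true
    · rw [if_pos hany] at h; exact absurd h (by norm_num)
    · rw [Nat.prime_def_lt]
      refine ⟨by omega, fun k hk hdvd => ?_⟩
      by_contra hk1
      have hk0 : k ≠ 0 := by rintro rfl; simp at hdvd; omega
      have hk2 : 2 ≤ k := by omega
      have hmem : (k : Int) ∈ PySem.List.pyRange 2 m 1 := by
        rw [PySem.List.mem_pyRange_one]; omega
      have hdvdI : (k : Int) ∣ m := by rw [hm0]; exact_mod_cast hdvd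
      have : (PySem.List.pyRange 2 m 1).any (fun i => PySem.Int.mod m i == 0) = true := by
        rw [List.any_eq_true]
        exact ⟨(k : Int), hmem, by simpa [beq_iff_eq] using (PySem.Int.mod_eq_zero_iff_dvd m k).mpr hdvdI⟩
      exact hany this
  · intro hp
    have hany : (PySem.List.pyRange 2 m 1).any (fun i => PySem.Int.mod m i == 0) = false := by
      rw [List.any_eq_false]
      intro j hj hmod
      rw [PySem.List.mem_pyRange_one] at hj
      have hdvdI : j ∣ m := (PySem.Int.mod_eq_zero_iff_dvd m j).mp (by simpa [beq_iff_eq] using hmod)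
      have hdvdN : j.toNat ∣ m.toNat := by
        have : (j.toNat : Int) ∣ m := by rwa [Int.toNat_of_nonneg (by omega)]
        rw [hm0] at this; exact_mod_cast this
      rcases (Nat.Prime.eq_one_or_self_of_dvd hp _ hdvdN) with h1 | h1 <;> omega
    rw [hany]; simp

theorem nrpdiv_pos (i : Int) (hi : 2 ≤ i) : 1 ≤ nrpdiv i := by
  unfold nrpdiv
  rw [PySem.List.foldl_ite_add_one]
  have hpos : 0 < (PySem.List.pyRange 2 (i + 1) 1).countP
      (fun j => decide (PySem.Int.mod i j = 0 ∧ prime_nr j = 1)) := by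
    rw [List.countP_pos_iff]
    have hne1 : i.toNat ≠ 1 := by omega
    have hprime := Nat.minFac_prime hne1
    have h2p : 2 ≤ (i.toNat.minFac : Int) := by exact_mod_cast hprime.two_le
    refine ⟨(i.toNat.minFac : Int), ?_, ?_⟩
    · rw [PySem.List.mem_pyRange_one]
      have := Nat.minFac_le (n := i.toNat) (by omega)
      omega
    · have hdvd : (i.toNat.minFac : Int) ∣ i := by
        have : (i.toNat.minFac : Int) ∣ (i.toNat : Int) := Int.natCast_dvd_natCast.mpr (Nat.minFac_dvd _)
        rwa [Int.toNat_of_nonneg (by omega)] at this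
      have hpn : prime_nr (i.toNat.minFac : Int) = 1 := by
        rw [prime_nr_one_iff _ h2p]
        simpa using hprime
      simp only [decide_eq_true_eq]
      exact ⟨(PySem.Int.mod_eq_zero_iff_dvd _ _).mpr hdvd, hpn⟩
  omega

theorem nrpdiv_nonneg (i : Int) : 0 ≤ nrpdiv i := by
  unfold nrpdiv
  rw [PySem.List.foldl_ite_add_one]
  omega

theorem aLoop_dec1 (n ct i : Int) (h1 : ct < n) (h2 : ct + nrpdiv i < n) :
    2 * (n - (ct + nrpdiv i)).toNat + (2 - (i + 1)).toNat < 2 * (n - ct).toNat + (2 - i).toNat := by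
  have h0 := nrpdiv_nonneg i
  by_cases hi : 2 ≤ i
  · have := nrpdiv_pos i hi; omega
  · omega

theorem aLoop_dec2 (n ct i : Int) (h1 : ct < n) :
    2 * (n - (n + 1)).toNat + (2 - (i + 1)).toNat < 2 * (n - ct).toNat + (2 - i).toNat := by
  omega

def aLoop (n : Int) (s : Int × Int × Int × Int) : List Int :=
  -- loop state s = (ct, i, number, k), packed in one tuple
  if s.1 < n then
    if s.1 + nrpdiv s.2.1 < n then
      aLoop n (s.1 + nrpdiv s.2.1, s.2.1 + 1, s.2.1 + 1, 0)
    else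
      aLoop n (n + 1, s.2.1 + 1, s.2.1, nrpdiv s.2.1 - (s.1 + nrpdiv s.2.1 - n))
  else [s.2.2.1, s.2.2.2]
termination_by 2 * (n - s.1).toNat + (2 - s.2.1).toNat
decreasing_by
  · exact aLoop_dec1 n s.1 s.2.1 (by assumption) (by assumption)
  · exact aLoop_dec2 n s.1 s.2.1 (by assumption)

def number_divisor (n : Int) : List Int :=
  if n = 1 then [1, 1] else aLoop n (1, 1, 0, 0)

-- ===== PORT B =====
-- inner `while m % d == 0: m //= d`; the added `2 ≤ d ∧ d ≤ m` guard only makes the recursion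
-- total (for 1 ≤ m, 2 ≤ d it is implied by d ∣ m, so the computation is exactly Python's)
theorem stripF_dec (m d : Int) (h : 2 ≤ d ∧ d ≤ m ∧ PySem.Int.mod m d = 0) :
    (PySem.Int.floordiv m d).toNat < m.toNat := by
  have hfd : PySem.Int.floordiv m d = m / d := PySem.Int.floordiv_eq_ediv_of_pos (by omega)
  have h1 : m / d < m := by rw [Int.ediv_lt_iff_lt_mul (by omega)]; nlinarith [h.1, h.2.1]
  have h2 : 0 ≤ m / d := Int.ediv_nonneg (by omega) (by omega)
  omega

def stripF (m d : Int) : Int :=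
  if h : 2 ≤ d ∧ d ≤ m ∧ PySem.Int.mod m d = 0 then stripF (PySem.Int.floordiv m d) d else m
termination_by m.toNat
decreasing_by
  exact stripF_dec m d h

-- termination facts for omegaLoop, cited in its decreasing_by
theorem stripF_le (m d : Int) : stripF m d ≤ m := by
  induction m using stripF.induct (d := d) with
  | case1 m h ih =>
    rw [stripF, dif_pos h]
    have hfd : PySem.Int.floordiv m d = m / d := PySem.Int.floordiv_eq_ediv_of_pos (by omega)
    have h1 : m / d < m := by rw [Int.ediv_lt_iff_lt_mul (by omega)]; nlinarith [h.1, h.2.1]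
    omega
  | case2 m h => rw [stripF, dif_neg h]

theorem stripF_lt (m d : Int) (hd : 2 ≤ d) (hdm : d ≤ m) (hdvd : d ∣ m) : stripF m d < m := by
  rw [stripF, dif_pos ⟨hd, hdm, (PySem.Int.mod_eq_zero_iff_dvd m d).mpr hdvd⟩]
  have hfd : PySem.Int.floordiv m d = m / d := PySem.Int.floordiv_eq_ediv_of_pos (by omega)
  have h1 : m / d < m := by rw [Int.ediv_lt_iff_lt_mul (by omega)]; nlinarith
  have := stripF_le (PySem.Int.floordiv m d) d
  omega

theorem stripF_of_small (m d : Int) (h : ¬ 2 ≤ d) : stripF m d = m := by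
  rw [stripF, dif_neg (fun hc => h hc.1)]

theorem omegaLoop_dec1 (m d : Int) (h1 : d * d ≤ m) (h2 : PySem.Int.mod m d = 0) :
    (stripF m d + 2 - (d + 1)).toNat < (m + 2 - d).toNat := by
  by_cases hd : 2 ≤ d
  · have hdm : d ≤ m := by nlinarith
    have hdvd : d ∣ m := (PySem.Int.mod_eq_zero_iff_dvd m d).mp h2
    have := stripF_lt m d hd hdm hdvd
    omega
  · rw [stripF_of_small m d hd]
    have hmn : 0 ≤ m := le_trans (mul_self_nonneg d) h1
    omega

theorem omegaLoop_dec2 (m d : Int) (h1 : d * d ≤ m) :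
    (m + 2 - (d + 1)).toNat < (m + 2 - d).toNat := by
  have hdd : d ≤ d * d := by by_cases h : d ≤ 0 <;> nlinarith
  omega

def omegaLoop (m d w : Int) : Int :=
  if d * d ≤ m then
    if PySem.Int.mod m d = 0 then omegaLoop (stripF m d) (d + 1) (w + 1)
    else omegaLoop m (d + 1) w
  else if 1 < m then w + 1 else w
termination_by (m + 2 - d).toNat
decreasing_by
  · exact omegaLoop_dec1 m d (by assumption) (by assumption)
  · exact omegaLoop_dec2 m d (by assumption)

def omegaF (m : Int) : Int := omegaLoop m 2 0

-- termination fact for bLoop, cited in its decreasing_by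
theorem bLoop_dec (n ct w : Int) (h1 : ct < n) (h2 : ¬ n ≤ ct + w) (h3 : 1 ≤ w) :
    (n - (ct + w)).toNat < (n - ct).toNat := by
  omega

-- the `1 ≤ omegaF i` test only makes the recursion total (it holds at every reachable state,
-- since every i ≥ 2 has a prime factor: see count_eq/nrpdiv_pos), so the computation is Python's
def bLoop (n ct i : Int) : List Int :=
  if ct < n then
    if n ≤ ct + omegaF i then [i, n - ct]
    else if 1 ≤ omegaF i then bLoop n (ct + omegaF i) (i + 1)
    else [0, 0]
  else [0, 0]
termination_by (n - ct).toNat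
decreasing_by
  exact bLoop_dec n ct (omegaF i) (by assumption) (by assumption) (by assumption)

def number_divisor_alt (n : Int) : List Int :=
  if n = 1 then [1, 1] else bLoop n 1 2

-- ===== PRECONDITION & SPEC =====
def Spec_number_divisor (n : Int) (out : List Int) : Prop := out = number_divisor_alt n
instance (n : Int) (out : List Int) : Decidable (Spec_number_divisor n out) := by unfold Spec_number_divisor; infer_instance

-- ===== CLAIM (what is proved, stated in full; the proofs are below) =====
def Claim_equal_number_divisor : Prop := ∀ (n : Int), Dom_number_divisor n → Spec_number_divisor n (number_divisor n)

-- ===== LEMMAS AND PROOFS =====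

-- properties of the stripping loop
theorem stripF_pos (m d : Int) : 1 ≤ m → 1 ≤ stripF m d := by
  induction m using stripF.induct (d := d) with
  | case1 m h ih =>
    intro hm
    rw [stripF, dif_pos h]
    apply ih
    rw [PySem.Int.floordiv_eq_ediv_of_pos (by omega)]
    rw [Int.le_ediv_iff_mul_le (by omega)]
    omega
  | case2 m h => intro hm; rw [stripF, dif_neg h]; exact hm

theorem stripF_not_dvd (m d : Int) (hd : 2 ≤ d) : 1 ≤ m → ¬ d ∣ stripF m d := by
  induction m using stripF.induct (d := d) with
  | case1 m h ih =>
    intro hm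
    rw [stripF, dif_pos h]
    apply ih
    rw [PySem.Int.floordiv_eq_ediv_of_pos (by omega)]
    rw [Int.le_ediv_iff_mul_le (by omega)]
    omega
  | case2 m h =>
    intro hm
    rw [stripF, dif_neg h]
    intro hdvd
    exact h ⟨hd, Int.le_of_dvd (by omega) hdvd, (PySem.Int.mod_eq_zero_iff_dvd m d).mpr hdvd⟩

-- a prime p ≠ d still divides the stripped number iff it divided m (d prime)
theorem stripF_prime_dvd_iff (m d p : Int) (hdp : Nat.Prime d.toNat) (hd : 2 ≤ d)
    (hp2 : 2 ≤ p) (hpp : Nat.Prime p.toNat) (hpd : p ≠ d) : 1 ≤ m → (p ∣ stripF m d ↔ p ∣ m) := by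
  induction m using stripF.induct (d := d) with
  | case1 m h ih =>
    intro hm
    rw [stripF, dif_pos h]
    have hdvd : d ∣ m := (PySem.Int.mod_eq_zero_iff_dvd m d).mp h.2.2
    have hfd : PySem.Int.floordiv m d = m / d := PySem.Int.floordiv_eq_ediv_of_pos (by omega)
    have hq1 : 1 ≤ PySem.Int.floordiv m d := by
      rw [hfd, Int.le_ediv_iff_mul_le (by omega)]; omega
    rw [ih hq1]
    have hmul : PySem.Int.floordiv m d * d = m := by rw [hfd]; exact Int.ediv_mul_cancel hdvd
    constructor
    · intro hq; exact hmul ▸ Dvd.dvd.mul_right hq d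
    · intro hpm
      have hppI : Prime p := by
        rw [Int.prime_iff_natAbs_prime]
        rwa [show p.natAbs = p.toNat by omega]
      have : p ∣ PySem.Int.floordiv m d * d := hmul.symm ▸ hpm
      rcases hppI.dvd_mul.mp this with hq | hq
      · exact hq
      · exfalso
        have hnd : p.toNat ∣ d.toNat := by
          have : (p.toNat : Int) ∣ d := by rwa [Int.toNat_of_nonneg (by omega)]
          have h2 : (p.toNat : Int) ∣ (d.toNat : Int) := by
            rwa [Int.toNat_of_nonneg (by omega : (0:Int) ≤ d)]
          exact_mod_cast h2
        rcases Nat.Prime.eq_one_or_self_of_dvd hdp _ hnd with h1 | h1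
        · have := hpp.two_le; omega
        · apply hpd; omega
  | case2 m h => intro hm; rw [stripF, dif_neg h]

-- the invariant of B's trial-division loop: if no prime below d divides m, the loop adds the
-- number of distinct prime factors of m
theorem omegaLoop_eq (m d w : Int) : 1 ≤ m → 2 ≤ d →
    (∀ p : Int, 2 ≤ p → Nat.Prime p.toNat → p ∣ m → d ≤ p) →
    omegaLoop m d w = w + (m.toNat.primeFactors.card : Int) := by
  induction m, d, w using omegaLoop.induct with
  | case1 m d w h1 h2 ih =>
    intro hm hd hinv
    have hdvd : d ∣ m := (PySem.Int.mod_eq_zero_iff_dvd m d).mp h2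
    -- d is prime: its least prime factor divides m, so it is ≥ d by the invariant, and ≤ d
    have hdp : Nat.Prime d.toNat := by
      have hq := Nat.minFac_prime (n := d.toNat) (by omega)
      have hqd : (d.toNat.minFac : Int) ∣ d := by
        have : (d.toNat.minFac : Int) ∣ (d.toNat : Int) := Int.natCast_dvd_natCast.mpr (Nat.minFac_dvd _)
        rwa [Int.toNat_of_nonneg (by omega)] at this
      have hqm : (d.toNat.minFac : Int) ∣ m := dvd_trans hqd hdvd
      have h2q : 2 ≤ (d.toNat.minFac : Int) := by exact_mod_cast hq.two_le
      have hge := hinv _ h2q (by simpa using hq) hqm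
      have hle := Nat.minFac_le (n := d.toNat) (by omega)
      have : d.toNat.minFac = d.toNat := by omega
      rwa [this] at hq
    have hm' : 1 ≤ stripF m d := stripF_pos m d hm
    have hnotd : ¬ d ∣ stripF m d := stripF_not_dvd m d hd hm
    rw [omegaLoop, if_pos h1, if_pos h2]
    rw [ih hm' (by omega) ?inv]
    case inv =>
      intro p hp2 hpp hpm'
      by_cases hpd : p = d
      · exact absurd (hpd ▸ hpm') hnotd
      · have := hinv p hp2 hpp ((stripF_prime_dvd_iff m d p hdp hd hp2 hpp hpd hm).mp hpm')
        omega
    -- card (primeFactors m) = card (primeFactors (stripF m d)) + 1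
    have hmem : d.toNat ∈ m.toNat.primeFactors := by
      rw [Nat.mem_primeFactors]
      refine ⟨hdp, ?_, by omega⟩
      have : (d.toNat : Int) ∣ (m.toNat : Int) := by
        rwa [Int.toNat_of_nonneg (by omega : (0:Int) ≤ d), Int.toNat_of_nonneg (by omega : (0:Int) ≤ m)]
      exact_mod_cast this
    have hset : (stripF m d).toNat.primeFactors = m.toNat.primeFactors.erase d.toNat := by
      ext q
      rw [Finset.mem_erase, Nat.mem_primeFactors, Nat.mem_primeFactors]
      constructor
      · rintro ⟨hqp, hqdvd, -⟩
        have hqI : (q : Int) ∣ stripF m d := by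
          have : (q : Int) ∣ ((stripF m d).toNat : Int) := Int.natCast_dvd_natCast.mpr hqdvd
          rwa [Int.toNat_of_nonneg (by omega)] at this
        have hqd : q ≠ d.toNat := by
          rintro rfl
          apply hnotd
          rwa [Int.toNat_of_nonneg (by omega : (0:Int) ≤ d)] at hqI
        have hq2 : 2 ≤ (q : Int) := by exact_mod_cast hqp.two_le
        have hqd' : (q : Int) ≠ d := by
          intro hc; apply hqd; omega
        have hqm : (q : Int) ∣ m :=
          (stripF_prime_dvd_iff m d (q : Int) hdp hd hq2 (by simpa using hqp) hqd' hm).mp hqI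
        refine ⟨hqd, hqp, ?_, by omega⟩
        have : (q : Int) ∣ (m.toNat : Int) := by rwa [Int.toNat_of_nonneg (by omega)]
        exact_mod_cast this
      · rintro ⟨hqd, hqp, hqdvd, -⟩
        have hqm : (q : Int) ∣ m := by
          have : (q : Int) ∣ (m.toNat : Int) := Int.natCast_dvd_natCast.mpr hqdvd
          rwa [Int.toNat_of_nonneg (by omega)] at this
        have hq2 : 2 ≤ (q : Int) := by exact_mod_cast hqp.two_le
        have hqd' : (q : Int) ≠ d := by
          intro hc; apply hqd; omega
        have hqI : (q : Int) ∣ stripF m d :=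
          (stripF_prime_dvd_iff m d (q : Int) hdp hd hq2 (by simpa using hqp) hqd' hm).mpr hqm
        refine ⟨hqp, ?_, by omega⟩
        have : (q : Int) ∣ ((stripF m d).toNat : Int) := by
          rwa [Int.toNat_of_nonneg (by omega : (0:Int) ≤ stripF m d)]
        exact_mod_cast this
    have hcard := Finset.card_erase_add_one hmem
    rw [hset]
    omega
  | case2 m d w h1 h2 ih =>
    intro hm hd hinv
    rw [omegaLoop, if_pos h1, if_neg h2]
    apply ih hm (by omega)
    intro p hp2 hpp hpm
    have := hinv p hp2 hpp hpm
    have hpd : p ≠ d := by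
      rintro rfl
      exact h2 ((PySem.Int.mod_eq_zero_iff_dvd m p).mpr hpm)
    omega
  | case3 m d w h1 hm1 =>
    intro hm hd hinv
    rw [omegaLoop, if_neg h1, if_pos hm1]
    ·
      -- m is prime here: otherwise its least factor q has q² ≤ m yet q ≥ d, contradicting d² > m
      have hmp : Nat.Prime m.toNat := by
        by_contra hnp
        have hq := Nat.minFac_prime (n := m.toNat) (by omega)
        have hsq := Nat.minFac_sq_le_self (n := m.toNat) (by omega) hnp
        have hqm : (m.toNat.minFac : Int) ∣ m := by
          have : (m.toNat.minFac : Int) ∣ (m.toNat : Int) := Int.natCast_dvd_natCast.mpr (Nat.minFac_dvd _)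
          rwa [Int.toNat_of_nonneg (by omega)] at this
        have h2q : 2 ≤ (m.toNat.minFac : Int) := by exact_mod_cast hq.two_le
        have hge := hinv _ h2q (by simpa using hq) hqm
        apply h1
        have hsqI : (m.toNat.minFac : Int) * (m.toNat.minFac : Int) ≤ m := by
          have : ((m.toNat.minFac * m.toNat.minFac : Nat) : Int) ≤ ((m.toNat : Nat) : Int) := by
            exact_mod_cast (by nlinarith [hsq] : m.toNat.minFac * m.toNat.minFac ≤ m.toNat)
          push_cast at this
          rwa [Int.toNat_of_nonneg (by omega)] at this
        nlinarith
      rw [Nat.Prime.primeFactors hmp]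
      simp
  | case4 m d w h1 hm1 =>
    intro hm hd hinv
    have hm0 : m = 1 := by omega
    rw [omegaLoop, if_neg h1, if_neg hm1, hm0]
    norm_num

-- A's count of prime divisors is also the number of distinct prime factors
theorem nrpdiv_eq (m : Int) (hm : 2 ≤ m) : nrpdiv m = (m.toNat.primeFactors.card : Int) := by
  unfold nrpdiv
  rw [PySem.List.foldl_ite_add_one]
  have hnd := PySem.List.nodup_pyRange_one (a := 2) (b := m + 1)
  rw [List.countP_eq_length_filter, ← List.toFinset_card_of_nodup (List.Nodup.filter _ hnd),
    List.toFinset_filter]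
  have himg : (PySem.List.pyRange 2 (m + 1) 1).toFinset.filter
      (fun j => decide (PySem.Int.mod m j = 0 ∧ prime_nr j = 1) = true) =
      m.toNat.primeFactors.image (fun k : ℕ => (k : ℤ)) := by
    ext x
    rw [Finset.mem_filter, List.mem_toFinset, PySem.List.mem_pyRange_one, Finset.mem_image]
    simp only [decide_eq_true_eq]
    constructor
    · rintro ⟨⟨hx2, hxm⟩, hmod, hpn⟩
      refine ⟨x.toNat, ?_, by omega⟩
      rw [Nat.mem_primeFactors]
      have hdvd : x ∣ m := (PySem.Int.mod_eq_zero_iff_dvd m x).mp hmod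
      refine ⟨(prime_nr_one_iff x hx2).mp hpn, ?_, by omega⟩
      have : (x.toNat : Int) ∣ (m.toNat : Int) := by
        rwa [Int.toNat_of_nonneg (by omega), Int.toNat_of_nonneg (by omega)]
      exact_mod_cast this
    · rintro ⟨k, hk, rfl⟩
      rw [Nat.mem_primeFactors] at hk
      obtain ⟨hkp, hkdvd, -⟩ := hk
      have hk2 : 2 ≤ (k : Int) := by exact_mod_cast hkp.two_le
      have hdvd : (k : Int) ∣ m := by
        have : (k : Int) ∣ (m.toNat : Int) := Int.natCast_dvd_natCast.mpr hkdvd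
        rwa [Int.toNat_of_nonneg (by omega)] at this
      have hle : (k : Int) ≤ m := Int.le_of_dvd (by omega) hdvd
      refine ⟨⟨hk2, by omega⟩, (PySem.Int.mod_eq_zero_iff_dvd m k).mpr hdvd, ?_⟩
      rw [prime_nr_one_iff _ hk2]
      simpa using hkp
  rw [himg, Finset.card_image_of_injective _ Nat.cast_injective]
  omega

-- the two per-number counts agree for every i ≥ 2
theorem count_eq (i : Int) (hi : 2 ≤ i) : omegaF i = nrpdiv i := by
  unfold omegaF
  rw [omegaLoop_eq i 2 0 (by omega) (by omega) (fun p hp2 _ _ => hp2), nrpdiv_eq i hi]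
  omega

-- A's while loop equals B's while loop (A reaches ct ≥ n only with [number,k] already holding B's answer)
theorem loop_eq (n : Int) : ∀ s : Int × Int × Int × Int, 2 ≤ s.2.1 →
    aLoop n s = if s.1 < n then bLoop n s.1 s.2.1 else [s.2.2.1, s.2.2.2] := by
  intro s
  induction s using aLoop.induct (n := n) with
  | case1 s hlt hbr ih =>
    intro hi
    rw [if_pos hlt, bLoop, if_pos hlt, count_eq s.2.1 hi, if_neg (by omega), if_pos (nrpdiv_pos s.2.1 hi)]
    rw [aLoop, if_pos hlt, if_pos hbr]
    have := ih (by simpa using by omega : 2 ≤ (s.1 + nrpdiv s.2.1, s.2.1 + 1, s.2.1 + 1, 0).2.1)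
    simp only at this
    rw [this, if_pos hbr]
  | case2 s hlt hbr ih =>
    intro hi
    rw [if_pos hlt, bLoop, if_pos hlt, count_eq s.2.1 hi, if_pos (by omega)]
    rw [aLoop, if_pos hlt, if_neg hbr]
    have := ih (by simpa using by omega : 2 ≤ (n + 1, s.2.1 + 1, s.2.1, nrpdiv s.2.1 - (s.1 + nrpdiv s.2.1 - n)).2.1)
    simp only at this
    rw [this, if_neg (by omega)]
    have harith : nrpdiv s.2.1 - (s.1 + nrpdiv s.2.1 - n) = n - s.1 := by ring
    rw [harith]
  | case3 s hlt =>
    intro _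
    rw [if_neg hlt, aLoop, if_neg hlt]

-- ===== VERDICT (by name: the statement is the Claim_ definition above) =====
theorem number_divisor_spec : Claim_equal_number_divisor := by
  intro n _
  unfold Spec_number_divisor number_divisor number_divisor_alt
  by_cases h1 : n = 1
  · rw [if_pos h1, if_pos h1]
  · rw [if_neg h1, if_neg h1]
    by_cases h2 : (1 : Int) < n
    · have hz : nrpdiv 1 = 0 := by decide
      rw [aLoop]
      simp only [hz]
      rw [if_pos h2, if_pos (by omega)]
      have hle := loop_eq n (1 + 0, 1 + 1, 1 + 1, 0) (by norm_num)
      simp only at hle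
      rw [hle, if_pos (by omega)]
      norm_num
    · rw [aLoop, if_neg h2, bLoop, if_neg h2]
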